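-- pv_equiv track=rewrite | github.com/gmdzy2010/leetcode_record | new/lcr_0172.py | search
-- ===== SOURCE A (Python) =====
-- from typing import List
--
-- def search(nums: List[int], target: int) -> int:
--     """二分搜索目标值的右边界
--
--     虽然找的是右边界，但返回的是左边界：
--     - 因为这里二分查找不是找到目标值就停止了，是还会继续向前找，直至找到最后一个目标值的位置
--
--     Args:
--         - nums (List[int]): 已排好序的数组
--         - target (int): 待查找的元素
--
--     Returns:
--         - int:
--             - 找到 target ，为 target 最后一次出现的位置
--             - 未找到 target，为比 target 小的元素最后一个位置
--     """
--     # * 两个指针分别位于数组的左右边界处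
--     L, R = 0, len(nums) - 1
--     while L <= R:
--         # * 中间位置
--         M = (L + R) // 2
--
--         # * 比较 中间处的值和目标值，根据情况确定舍弃哪一半
--         # ! 这里等号可以取到，说明找到了目标值 L 仍然会右移，即 L 停留在最后一个目标值的位置
--         if nums[M] <= target:
--             L = M + 1
--         else:
--             R = M - 1
--
--     return L
-- ===== SOURCE B (Python) =====
-- def search(nums, target):
--     """Since nums is sorted, the right boundary A finds equals the number of
--     elements <= target: one linear counting pass instead of binary search."""
--     count = 0
--     for x in nums:
--         if x <= target:
--             count += 1
--     return count
-- ===== Notes on version B (the rewrite author's own statement) =====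
-- stated objective: simpler
-- what changed: Replaced the two-pointer binary search with a single linear pass that counts the elements <= target, which on a sorted array equals the right-boundary index A computes.
-- outside the precondition, e.g. on search([3, 1, 2], 2): A returns 3, B returns 2
import Mathlib
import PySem

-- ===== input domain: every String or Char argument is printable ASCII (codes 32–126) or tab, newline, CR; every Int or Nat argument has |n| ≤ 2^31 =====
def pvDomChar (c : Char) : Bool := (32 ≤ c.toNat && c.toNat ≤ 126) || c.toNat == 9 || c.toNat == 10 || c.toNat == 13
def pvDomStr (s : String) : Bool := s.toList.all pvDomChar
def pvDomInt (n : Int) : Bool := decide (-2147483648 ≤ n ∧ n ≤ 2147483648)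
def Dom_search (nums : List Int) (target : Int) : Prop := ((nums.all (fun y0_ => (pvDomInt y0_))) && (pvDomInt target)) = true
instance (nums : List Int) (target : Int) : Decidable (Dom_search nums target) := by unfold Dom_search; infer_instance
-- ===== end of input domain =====

-- B replaces A's binary search with one linear pass counting elements <= target
-- (equal on sorted input); objective: simpler.


-- ===== PORT A =====
-- the while-loop of A; state is (L, R)
def searchLoop (nums : List Int) (target : Int) (L R : Int) : Int :=
  if h : L ≤ R then
    let M := PySem.Int.floordiv (L + R) 2
    match PySem.List.pyGet? nums M with
    | some v =>
        if v ≤ target then searchLoop nums target (M + 1) R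
        else searchLoop nums target L (M - 1)
    | none => L  -- IndexError in Python; unreachable from search's initial call
  else L
termination_by (R + 1 - L).toNat
decreasing_by
  all_goals
    have hb := PySem.Int.floordiv_two_mid_bounds h
    omega

def search (nums : List Int) (target : Int) : Int :=
  searchLoop nums target 0 ((nums.length : Int) - 1)

-- ===== PORT B =====
def search_alt (nums : List Int) (target : Int) : Int :=
  nums.foldl (fun count x => if x ≤ target then count + 1 else count) 0

-- ===== PRECONDITION & SPEC =====
-- A's docstring requires nums sorted; on other input its binary-search answer is an
-- unspecified artefact. Pre_ admits every array partitioned about target (each element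
-- ≤ target precedes each element > target) — the weakest shape under which the search
-- is meaningful; every sorted array satisfies it.
def Pre_search (nums : List Int) (target : Int) : Prop :=
  nums.Pairwise (fun a b => b ≤ target → a ≤ target)
instance (nums : List Int) (target : Int) : Decidable (Pre_search nums target) := by unfold Pre_search; infer_instance

def pvWitness_search : List Int × Int := ([1, 2, 2, 3], 2)

def Spec_search (nums : List Int) (target : Int) (out : Int) : Prop := out = search_alt nums target
instance (nums : List Int) (target : Int) (out : Int) : Decidable (Spec_search nums target out) := by unfold Spec_search; infer_instance

-- ===== CLAIM (what is proved, stated in full; the proofs are below) =====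
def Claim_equal_search : Prop := ∀ (nums : List Int) (target : Int), Dom_search nums target → Pre_search nums target → Spec_search nums target (search nums target)

-- ===== LEMMAS AND PROOFS =====

-- B's fold is countP
lemma alt_eq_countP (nums : List Int) (target : Int) :
    search_alt nums target = ((nums.countP (fun x => decide (x ≤ target))) : Int) := by
  have h := PySem.List.foldl_count_if (fun x : Int => decide (x ≤ target)) nums 0
  simpa [search_alt] using h

-- a list whose first l positions satisfy p and the rest do not has countP = l
lemma countP_eq_of_split (nums : List Int) (p : Int → Bool) (l : Nat) (hl : l ≤ nums.length)
    (h1 : ∀ i (hi : i < nums.length), i < l → p nums[i] = true)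
    (h2 : ∀ i (hi : i < nums.length), l ≤ i → p nums[i] = false) :
    nums.countP p = l := by
  have hc : nums.countP p = (nums.take l).countP p + (nums.drop l).countP p := by
    rw [← List.countP_append, List.take_append_drop]
  have ht : (nums.take l).countP p = (nums.take l).length := by
    rw [List.countP_eq_length]
    intro a ha
    obtain ⟨i, hi, rfl⟩ := List.mem_iff_getElem.mp ha
    have hi2 : i < l ∧ i < nums.length := by simp [List.length_take] at hi; omega
    rw [List.getElem_take]
    exact h1 i hi2.2 hi2.1
  have hd : (nums.drop l).countP p = 0 := by
    rw [List.countP_eq_zero]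
    intro a ha
    obtain ⟨i, hi, rfl⟩ := List.mem_iff_getElem.mp ha
    have hi2 : l + i < nums.length := by simp [List.length_drop] at hi; omega
    rw [List.getElem_drop]
    simp [h2 (l + i) hi2 (Nat.le_add_right _ _)]
  rw [hc, ht, hd, List.length_take]
  omega

-- finished loop: L has reached R + 1 and everything is split at L
lemma loop_terminal (nums : List Int) (target : Int) (L R : Int)
    (h0 : 0 ≤ L) (hR : R ≤ (nums.length : Int) - 1) (hn : ¬ L ≤ R) (hLR : L ≤ R + 1)
    (hinv1 : ∀ i : Nat, (i : Int) < L → ∀ hi : i < nums.length, nums[i] ≤ target)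
    (hinv2 : ∀ i : Nat, R < (i : Int) → ∀ hi : i < nums.length, target < nums[i]) :
    searchLoop nums target L R = ((nums.countP (fun x => decide (x ≤ target))) : Int) := by
  rw [searchLoop, dif_neg hn]
  have hLlen : L.toNat ≤ nums.length := by omega
  rw [countP_eq_of_split nums _ L.toNat hLlen
    (fun i hi hil => decide_eq_true (hinv1 i (by omega) hi))
    (fun i hi hil => decide_eq_false (not_le.mpr (hinv2 i (by omega) hi)))]
  omega

-- loop invariant: everything left of L is ≤ target, everything right of R is > target
lemma loop_eq (nums : List Int) (target : Int)
    (hs : nums.Pairwise (fun a b => b ≤ target → a ≤ target)) :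
    ∀ (n : Nat) (L R : Int), (R + 1 - L).toNat ≤ n → 0 ≤ L → R ≤ (nums.length : Int) - 1 → L ≤ R + 1 →
    (∀ i : Nat, (i : Int) < L → ∀ hi : i < nums.length, nums[i] ≤ target) →
    (∀ i : Nat, R < (i : Int) → ∀ hi : i < nums.length, target < nums[i]) →
    searchLoop nums target L R = ((nums.countP (fun x => decide (x ≤ target))) : Int) := by
  have hpw := List.pairwise_iff_getElem.mp hs
  intro n
  induction n with
  | zero =>
      intro L R hfuel h0 hR hLR hinv1 hinv2
      exact loop_terminal nums target L R h0 hR (by omega) hLR hinv1 hinv2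
  | succ n ih =>
      intro L R hfuel h0 hR hLR hinv1 hinv2
      by_cases hc : L ≤ R
      · have hmid := PySem.Int.floordiv_two_mid_bounds hc
        set M := PySem.Int.floordiv (L + R) 2 with hMdef
        have hM0 : 0 ≤ M := by omega
        have hMlen : M < (nums.length : Int) := by omega
        have hget : PySem.List.pyGet? nums M = some nums[M.toNat] :=
          PySem.List.pyGet?_eq_some_getElem nums hM0 hMlen
        rw [searchLoop, dif_pos hc]
        simp only [← hMdef, hget]
        by_cases hv : nums[M.toNat] ≤ target
        · rw [if_pos hv]
          apply ih (M + 1) R (by omega) (by omega) hR (by omega) _ hinv2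
          intro i hiM hi
          rcases Nat.lt_or_ge i M.toNat with hlt | hge
          · exact hpw i M.toNat hi (by omega) hlt hv
          · have : i = M.toNat := by omega
            subst this; exact hv
        · rw [if_neg hv]
          apply ih L (M - 1) (by omega) h0 (by omega) (by omega) hinv1
          intro i hiM hi
          rcases Nat.lt_or_ge M.toNat i with hlt | hge
          · exact not_le.mp fun hle => hv (hpw M.toNat i (by omega) hi hlt hle)
          · have : i = M.toNat := by omega
            subst this; exact not_le.mp hv
      · exact loop_terminal nums target L R h0 hR hc hLR hinv1 hinv2

-- ===== VERDICT (by name: the statement is the Claim_ definition above) =====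
theorem search_spec : Claim_equal_search := by
  intro nums target _ hpre
  unfold Spec_search search
  rw [alt_eq_countP]
  exact loop_eq nums target hpre ((nums.length : Int) - 1 + 1 - 0).toNat 0 ((nums.length : Int) - 1)
    (le_refl _) (le_refl _) (le_refl _) (by omega)
    (fun i hi _ => absurd hi (by omega))
    (fun i hi hlen => absurd hi (by omega))
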